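-- pv_equiv track=rewrite | github.com/RS0136/AIP | aip/aip.py | text_tokenize
-- ===== SOURCE A (Python) =====
-- from typing import Dict, List, Tuple, Optional
--
-- def text_tokenize(s: str) -> List[str]:
--     if not isinstance(s, str):
--         return []
--     s = s.lower()
--     for ch in [",", ".", "!", "?", ":", ";", "(", ")", "[", "]", "{", "}", "\"", "'"]:
--         s = s.replace(ch, " ")
--     toks = [t for t in s.split() if t]
--     return toks
-- ===== SOURCE B (Python) =====
-- def text_tokenize(s):
--     if not isinstance(s, str):
--         return []
--     delims = set(",.!?:;()[]{}\"'")
--     toks = []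
--     buf = []
--     for c in s.lower():
--         if c in delims or c.isspace():
--             if buf:
--                 toks.append(''.join(buf))
--                 buf = []
--         else:
--             buf.append(c)
--     if buf:
--         toks.append(''.join(buf))
--     return toks
-- ===== Notes on version B (the rewrite author's own statement) =====
-- stated objective: alternative
-- what changed: A lowercases then makes 14 full-string replace passes followed by split(); B makes a single pass over the characters with a token buffer, flushing on any of the 14 punctuation characters or whitespace.
import Mathlib
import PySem

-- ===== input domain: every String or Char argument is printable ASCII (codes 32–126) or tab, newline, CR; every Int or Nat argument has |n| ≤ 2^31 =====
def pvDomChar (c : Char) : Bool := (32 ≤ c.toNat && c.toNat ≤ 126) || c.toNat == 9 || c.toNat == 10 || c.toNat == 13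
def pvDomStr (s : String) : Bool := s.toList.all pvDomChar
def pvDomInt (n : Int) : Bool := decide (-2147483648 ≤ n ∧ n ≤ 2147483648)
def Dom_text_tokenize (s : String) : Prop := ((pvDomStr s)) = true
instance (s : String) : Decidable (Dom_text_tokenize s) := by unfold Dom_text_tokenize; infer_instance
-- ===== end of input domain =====

-- B replaces A's 14 whole-string .replace passes + split by one single pass over the
-- characters with a token buffer (objective: alternative decomposition, one traversal).

-- ===== PORT A =====
-- literal transliteration of A: the 'isinstance' guard is always true for a String
-- argument; then lower, the 14 single-char replaces, split(), and the truthiness filter.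
def text_tokenize (s : String) : List String :=
  let s1 := PySem.Str.lower s
  let s2 := [",", ".", "!", "?", ":", ";", "(", ")", "[", "]", "{", "}", "\"", "'"].foldl
      (fun t ch => PySem.Str.replace t ch " ") s1
  (PySem.Str.split₀ s2).filter (fun t => t ≠ "")

-- ===== PORT B =====
-- the delimiter characters of Source B's `set(",.!?:;()[]{}\"'")`
def pvDelims : List Char := [',', '.', '!', '?', ':', ';', '(', ')', '[', ']', '{', '}', '\"', '\'']

-- one step of Source B's loop; state = (toks, buf), flush the buffer on a delimiter/space
def pvStepB (st : List String × List Char) (c : Char) : List String × List Char :=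
  if c ∈ pvDelims || PySem.Chars.isspace c then
    if st.2 = [] then st else (st.1 ++ [String.ofList st.2], [])
  else (st.1, st.2 ++ [c])

def text_tokenize_alt (s : String) : List String :=
  let st := (PySem.Str.lower s).toList.foldl pvStepB ([], [])
  if st.2 = [] then st.1 else st.1 ++ [String.ofList st.2]

-- ===== PRECONDITION & SPEC =====
def Spec_text_tokenize (s : String) (out : List String) : Prop := out = text_tokenize_alt s
instance (s : String) (out : List String) : Decidable (Spec_text_tokenize s out) := by unfold Spec_text_tokenize; infer_instance

-- ===== CLAIM (what is proved, stated in full; the proofs are below) =====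
def Claim_equal_text_tokenize : Prop := ∀ (s : String), Dom_text_tokenize s → Spec_text_tokenize s (text_tokenize s)

-- ===== LEMMAS AND PROOFS =====

-- A's punctuation-to-space substitution, seen as a character map (proof-side only)
def pvMapP (d : Char) : Char := if d ∈ pvDelims then ' ' else d

-- replacing a single character by ' ' is a map over the characters
theorem pv_replace_go_single (c : Char) :
    ∀ (fuel : Nat) (l acc : List Char), l.length ≤ fuel →
      PySem.Chars.replace.go [c] [' '] fuel l acc
        = acc.reverse ++ l.map (fun d => if d = c then ' ' else d) := by
  intro fuel
  induction fuel with
  | zero => intro l acc h; simp at h; simp [h, PySem.Chars.replace.go]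
  | succ n ih =>
    intro l acc h
    cases l with
    | nil => simp [PySem.Chars.replace.go]
    | cons d t =>
      rw [PySem.Chars.replace.go]
      by_cases hd : d = c
      · simp [hd, List.isPrefixOf, ih t _ (by simpa using h)]
      · have : [c].isPrefixOf (d :: t) = false := by simp [List.isPrefixOf, Ne.symm hd]
        simp [this, hd, ih t _ (by simpa using h)]

theorem pv_replace_single (c : Char) (l : List Char) :
    PySem.Chars.replace l [c] [' '] = l.map (fun d => if d = c then ' ' else d) := by
  rw [PySem.Chars.replace]
  simp [pv_replace_go_single c l.length l [] le_rfl]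

-- the 14 successive replaces collapse to one map keyed by membership
theorem pv_foldl_replace (cs : List Char) :
    ∀ (l : List Char),
      cs.foldl (fun t c => PySem.Chars.replace t [c] [' ']) l
        = l.map (fun d => if d ∈ cs then ' ' else d) := by
  induction cs with
  | nil => intro l; simp
  | cons c cs ih =>
    intro l
    rw [List.foldl_cons, pv_replace_single, ih, List.map_map]
    apply List.map_congr_left
    intro d _
    by_cases hd : d = c
    · subst hd
      by_cases hs : (' ' : Char) ∈ cs <;> simp [hs]
    · simp [hd]

-- core invariant: split₀'s scan of the punctuation-mapped text, filtered of empty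
-- tokens, is exactly Source B's buffer loop (cur/acc are split₀'s reversed state,
-- buf/toks = their reverses on B's side)
theorem pv_go_eq_foldl :
    ∀ (l cur : List Char) (acc : List (List Char)), (∀ t ∈ acc, t ≠ []) →
      ((PySem.Chars.split₀.go (l.map pvMapP) cur acc).map String.ofList).filter (fun t => t ≠ "")
        = (let st := l.foldl pvStepB ((acc.reverse).map String.ofList, cur.reverse);
           if st.2 = [] then st.1 else st.1 ++ [String.ofList st.2]) := by
  intro l
  induction l with
  | nil =>
    intro cur acc hacc
    rw [List.map_nil, PySem.Chars.split₀.go, List.foldl_nil]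
    by_cases hc : cur = []
    · rw [if_pos (List.isEmpty_iff.mpr hc)]
      rw [List.filter_eq_self.mpr]
      · simp [hc]
      · simp only [List.mem_map]
        rintro t ⟨u, hu, rfl⟩
        simpa using hacc u (by simpa using hu)
    · rw [if_neg (by simp [hc])]
      rw [List.filter_eq_self.mpr]
      · simp [hc]
      · simp only [List.mem_map]
        rintro t ⟨u, hu, rfl⟩
        rcases List.mem_cons.mp (List.mem_reverse.mp hu) with h | h
        · simp at h ⊢; simp [h, hc]
        · simpa using hacc u h
  | cons d t ih =>
    intro cur acc hacc
    rw [List.map_cons, PySem.Chars.split₀.go, List.foldl_cons]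
    by_cases hd : d ∈ pvDelims
    · have h1 : pvMapP d = ' ' := by simp [pvMapP, hd]
      rw [h1, if_pos (by decide)]
      by_cases hc : cur = []
      · rw [if_pos (List.isEmpty_iff.mpr hc), ih [] acc hacc]
        simp [pvStepB, hd, hc]
      · rw [if_neg (by simp [hc])]
        rw [ih [] (cur.reverse :: acc) (by intro x hx; rcases List.mem_cons.mp hx with h | h; exacts [by simp [h, hc], hacc x h])]
        simp [pvStepB, hd, hc]
    · have h1 : pvMapP d = d := by simp [pvMapP, hd]
      rw [h1]
      by_cases hs : PySem.Chars.isspace d = true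
      · rw [if_pos hs]
        by_cases hc : cur = []
        · rw [if_pos (List.isEmpty_iff.mpr hc), ih [] acc hacc]
          simp [pvStepB, hd, hs, hc]
        · rw [if_neg (by simp [hc])]
          rw [ih [] (cur.reverse :: acc) (by intro x hx; rcases List.mem_cons.mp hx with h | h; exacts [by simp [h, hc], hacc x h])]
          simp [pvStepB, hd, hs, hc]
      · rw [if_neg hs, ih (d :: cur) acc hacc]
        simp [pvStepB, hd, hs]

-- A's string-level replace cascade, moved to the character level
theorem pv_A_toList (s1 : String) :
    (([",", ".", "!", "?", ":", ";", "(", ")", "[", "]", "{", "}", "\"", "'"].foldl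
        (fun t ch => PySem.Str.replace t ch " ") s1)).toList
      = s1.toList.map pvMapP := by
  simp only [List.foldl_cons, List.foldl_nil, PySem.Str.toList_replace]
  have h := pv_foldl_replace pvDelims s1.toList
  simp only [pvDelims, List.foldl_cons, List.foldl_nil] at h
  rw [show (",":String).toList = [','] from rfl, show (".":String).toList = ['.'] from rfl,
      show ("!":String).toList = ['!'] from rfl, show ("?":String).toList = ['?'] from rfl,
      show (":":String).toList = [':'] from rfl, show (";":String).toList = [';'] from rfl,
      show ("(":String).toList = ['('] from rfl, show (")":String).toList = [')'] from rfl,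
      show ("[":String).toList = ['['] from rfl, show ("]":String).toList = [']'] from rfl,
      show ("{":String).toList = ['{'] from rfl, show ("}":String).toList = ['}'] from rfl,
      show ("\"":String).toList = ['\"'] from rfl, show ("'":String).toList = ['\''] from rfl,
      show (" ":String).toList = [' '] from rfl]
  rw [h]
  unfold pvMapP pvDelims
  rfl

-- ===== VERDICT (by name: the statement is the Claim_ definition above) =====
theorem text_tokenize_spec : Claim_equal_text_tokenize := by
  intro s _
  unfold Spec_text_tokenize text_tokenize text_tokenize_alt
  show (PySem.Str.split₀ _).filter _ = _
  rw [show ∀ t, PySem.Str.split₀ t = List.map String.ofList (PySem.Chars.split₀ t.toList) from fun _ => rfl,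
      pv_A_toList, PySem.Chars.split₀]
  have h := pv_go_eq_foldl (PySem.Str.lower s).toList [] [] (by simp)
  simpa using h
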